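-- pv_equiv track=rewrite | github.com/MatthewDaws/CodeJam | 2013_1a/c.py | prodgreqs_base
-- ===== SOURCE A (Python) =====
-- import itertools
-- import math
-- from collections import namedtuple
--
-- ProdFreqPair = namedtuple("ProdFreqPair", ["product", "freq"])
--
-- def prodgreqs_base(A):
--     """Given A = [x2 ... xM] where set A contains x2 lots of 2, x3 lots of 3, etc.
--     Yields all ProdFreqPair's
--     This algorithm does _not_ ensure that the products returned are distinct..."""
--     choices = [ list(range(xi+1)) for xi in A ]
--     M = len(choices) + 1
--     for yi in itertools.product(*choices):
--         prod, freq = 1, 1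
--         for a, y, x in zip(range(2, M+1), yi, A):
--             prod *= a ** y
--             freq *= math.factorial(x) // math.factorial(y) // math.factorial(x-y)
--         yield ProdFreqPair(prod, freq)
-- ===== SOURCE B (Python) =====
-- from collections import namedtuple
--
-- ProdFreqPair = namedtuple("ProdFreqPair", ["product", "freq"])
--
-- def prodgreqs_base(A):
--     """Recursive DFS over positions carrying the running product and frequency;
--     binomial coefficients are updated incrementally instead of recomputing factorials.
--     If any range is empty (xi < 0) the Cartesian product is empty: nothing to yield."""
--     if any(x < 0 for x in A):
--         return
--     def rec(i, prod, freq):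
--         if i == len(A):
--             yield ProdFreqPair(prod, freq)
--             return
--         x = A[i]
--         a = i + 2
--         binom = 1
--         p = prod
--         for y in range(x + 1):
--             yield from rec(i + 1, p, freq * binom)
--             binom = binom * (x - y) // (y + 1)
--             p *= a
--     yield from rec(0, 1, 1)
-- ===== Notes on version B (the rewrite author's own statement) =====
-- stated objective: alternative
-- what changed: Replaced the itertools.product loop that recomputes three factorials and a power for every coordinate of every tuple with a recursive DFS over positions that carries the running product and frequency and updates each binomial coefficient incrementally (and short-circuits when some xi < 0 makes the product empty).
import Mathlib
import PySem

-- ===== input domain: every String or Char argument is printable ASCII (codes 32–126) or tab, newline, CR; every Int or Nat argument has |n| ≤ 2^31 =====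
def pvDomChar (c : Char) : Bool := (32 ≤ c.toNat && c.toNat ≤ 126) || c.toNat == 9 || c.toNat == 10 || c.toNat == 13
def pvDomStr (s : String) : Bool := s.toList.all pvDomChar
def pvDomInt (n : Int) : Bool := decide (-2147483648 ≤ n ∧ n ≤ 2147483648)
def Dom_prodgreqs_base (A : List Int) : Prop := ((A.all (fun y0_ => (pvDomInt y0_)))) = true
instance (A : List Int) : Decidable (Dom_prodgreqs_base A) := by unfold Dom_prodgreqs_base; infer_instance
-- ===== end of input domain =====

-- B replaces A's Cartesian-product loop with factorials recomputed per tuple by a DFS that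
-- carries the running product and frequency and updates binomial coefficients incrementally
-- (objective: alternative algorithm, same yielded sequence).
-- Both are generators in Python; the equivalence is about the yielded sequence as a list.

-- ===== PORT A =====
-- itertools.product(*choices), first coordinate varying slowest (Python's order)
def pvProduct : List (List Int) → List (List Int)
  | [] => [[]]
  | c :: rest => c.flatMap (fun v => (pvProduct rest).map (fun t => v :: t))

-- math.factorial (only reached on nonnegative arguments in A)
def pvFact (n : Int) : Int := ((Nat.factorial n.toNat : Nat) : Int)

-- the body of A's inner 'for a, y, x in zip(...)' loop
def pvStepA (pf : Int × Int) (t : Int × Int × Int) : Int × Int :=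
  (pf.1 * t.1 ^ (t.2.1).toNat,
   pf.2 * PySem.Int.floordiv (PySem.Int.floordiv (pvFact t.2.2) (pvFact t.2.1)) (pvFact (t.2.2 - t.2.1)))

def prodgreqs_base (A : List Int) : List (Int × Int) :=
  let choices := A.map (fun xi => PySem.List.pyRange 0 (xi + 1) 1)
  let M : Int := (choices.length : Int) + 1
  (pvProduct choices).map (fun yi =>
    ((PySem.List.pyRange 2 (M + 1) 1).zip (yi.zip A)).foldl pvStepA (1, 1))

-- ===== PORT B =====
-- rec(i, prod, freq) from Source B: the list suffix plays the role of A[i:], a = i + 2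
def pvAltRec : List Int → Int → Int → Int → List (Int × Int)
  | [], _, prod, freq => [(prod, freq)]
  | x :: rest, a, prod, freq =>
    ((PySem.List.pyRange 0 (x + 1) 1).foldl
      (fun (st : List (Int × Int) × Int × Int) y =>
        (st.1 ++ pvAltRec rest (a + 1) st.2.2 (freq * st.2.1),
         PySem.Int.floordiv (st.2.1 * (x - y)) (y + 1),
         st.2.2 * a))
      ([], 1, prod)).1

def prodgreqs_base_alt (A : List Int) : List (Int × Int) :=
  if A.any (fun x => x < 0) then [] else pvAltRec A 2 1 1

-- ===== PRECONDITION & SPEC =====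
def Spec_prodgreqs_base (A : List Int) (out : List (Int × Int)) : Prop := out = prodgreqs_base_alt A
instance (A : List Int) (out : List (Int × Int)) : Decidable (Spec_prodgreqs_base A out) := by unfold Spec_prodgreqs_base; infer_instance

-- ===== CLAIM (what is proved, stated in full; the proofs are below) =====
def Claim_equal_prodgreqs_base : Prop := ∀ (A : List Int), Dom_prodgreqs_base A → Spec_prodgreqs_base A (prodgreqs_base A)

-- ===== LEMMAS AND PROOFS =====

-- common reference value: pairs (a^y2 * a'^y3 * …, C(x2,y2) * C(x3,y3) * …) in product order
def pvSpec : List Int → Int → List (Int × Int)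
  | [], _ => [(1, 1)]
  | x :: rest, a =>
    (PySem.List.pyRange 0 (x + 1) 1).flatMap (fun y =>
      (pvSpec rest (a + 1)).map (fun pf =>
        (a ^ y.toNat * pf.1, ((x.toNat.choose y.toNat : Nat) : Int) * pf.2)))

theorem pvFact_div (x y : Int) (h0 : 0 ≤ y) (h1 : y ≤ x) :
    PySem.Int.floordiv (PySem.Int.floordiv (pvFact x) (pvFact y)) (pvFact (x - y))
      = ((x.toNat.choose y.toNat : Nat) : Int) := by
  have hxy : (x - y).toNat = x.toNat - y.toNat := by omega
  simp only [pvFact, PySem.Int.floordiv_natCast, hxy]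
  norm_cast
  rw [Nat.div_div_eq_div_mul, Nat.choose_eq_factorial_div_factorial (by omega)]

theorem pvBinom_step (x y : Int) (h0 : 0 ≤ y) (h1 : y ≤ x) :
    PySem.Int.floordiv (((x.toNat.choose y.toNat : Nat) : Int) * (x - y)) (y + 1)
      = ((x.toNat.choose (y + 1).toNat : Nat) : Int) := by
  have h2 : x - y = ((x.toNat - y.toNat : Nat) : Int) := by omega
  have h3 : y + 1 = ((y.toNat + 1 : Nat) : Int) := by omega
  have h4 : (y + 1).toNat = y.toNat + 1 := by omega
  rw [h2, h4, ← Nat.cast_mul]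
  rw [show ((x.toNat.choose y.toNat * (x.toNat - y.toNat) : Nat) : Int) = ((x.toNat.choose y.toNat * (x.toNat - y.toNat) : Nat) : Int) from rfl, h3]
  rw [PySem.Int.floordiv_natCast]
  norm_cast
  rw [← Nat.choose_succ_right_eq, Nat.mul_div_cancel _ (Nat.succ_pos _)]

-- A's inner fold is multiplicative in its initial state
theorem pvFoldA_mul : ∀ (l : List (Int × Int × Int)) (p f : Int),
    l.foldl pvStepA (p, f) = (p * (l.foldl pvStepA (1, 1)).1, f * (l.foldl pvStepA (1, 1)).2)
  | [], p, f => by simp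
  | t :: l, p, f => by
    rw [List.foldl_cons, List.foldl_cons, pvFoldA_mul l, pvFoldA_mul l (pvStepA (1, 1) t).1]
    simp [pvStepA, mul_assoc]

-- A's mapped fold equals pvSpec
theorem pvA_eq_spec : ∀ (xs : List Int) (a : Int),
    (pvProduct (xs.map (fun xi => PySem.List.pyRange 0 (xi + 1) 1))).map
      (fun yi => ((PySem.List.pyRange a (a + (xs.length : Int)) 1).zip (yi.zip xs)).foldl pvStepA (1, 1))
    = pvSpec xs a
  | [], a => by
    simp [pvProduct, pvSpec, PySem.List.pyRange_one_eq_nil (le_refl a)]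
  | x :: xs, a => by
    simp only [pvProduct, pvSpec, List.map_cons, List.map_flatMap, List.map_map]
    refine List.flatMap_congr (fun y hy => ?_)
    rw [PySem.List.mem_pyRange_one] at hy
    have hcons : PySem.List.pyRange a (a + ((x :: xs).length : Int)) 1
        = a :: PySem.List.pyRange (a + 1) ((a + 1) + (xs.length : Int)) 1 := by
      rw [show a + (((x :: xs).length : Nat) : Int) = (a + 1) + (xs.length : Int) by
        simp only [List.length_cons]; push_cast; ring]
      exact PySem.List.pyRange_one_cons
        (by have := Int.natCast_nonneg xs.length; omega)
    rw [← pvA_eq_spec xs (a + 1), List.map_map]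
    refine List.map_congr_left (fun yi _ => ?_)
    simp only [Function.comp, hcons, List.zip_cons_cons, List.foldl_cons]
    rw [pvFoldA_mul]
    simp only [pvStepA, one_mul]
    rw [pvFact_div x y hy.1 (by omega)]

-- B's loop: invariant 'binom = C(x, y0), p = prod * a^y0' along range(y0, x+1)
theorem pvAlt_loop (rest : List Int) (a prod freq : Int)
    (IH : ∀ p f, pvAltRec rest (a + 1) p f = (pvSpec rest (a + 1)).map (fun pf => (p * pf.1, f * pf.2)))
    (x : Int) :
    ∀ (n : Nat) (y0 : Int), 0 ≤ y0 → y0 + (n : Int) = x + 1 →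
      ∀ acc : List (Int × Int),
      ((PySem.List.pyRange y0 (x + 1) 1).foldl
        (fun (st : List (Int × Int) × Int × Int) y =>
          (st.1 ++ pvAltRec rest (a + 1) st.2.2 (freq * st.2.1),
           PySem.Int.floordiv (st.2.1 * (x - y)) (y + 1),
           st.2.2 * a))
        (acc, ((x.toNat.choose y0.toNat : Nat) : Int), prod * a ^ y0.toNat)).1
      = acc ++ (PySem.List.pyRange y0 (x + 1) 1).flatMap
          (fun y => (pvSpec rest (a + 1)).map
            (fun pf => (prod * (a ^ y.toNat * pf.1), freq * (((x.toNat.choose y.toNat : Nat) : Int) * pf.2))))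
  | 0, y0, h0, hn, acc => by
    rw [PySem.List.pyRange_one_eq_nil (by omega)]
    simp
  | (n + 1), y0, h0, hn, acc => by
    have hy : y0 < x + 1 := by push_cast at hn; omega
    rw [PySem.List.pyRange_one_cons hy, List.foldl_cons, List.flatMap_cons]
    have hb := pvBinom_step x y0 h0 (by omega)
    have hp : prod * a ^ y0.toNat * a = prod * a ^ (y0 + 1).toNat := by
      rw [mul_assoc, ← pow_succ]
      congr 2
      omega
    simp only [hb, hp]
    rw [pvAlt_loop rest a prod freq IH x n (y0 + 1) (by omega) (by push_cast at hn ⊢; omega)]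
    rw [IH, List.append_assoc]
    congr 2
    refine List.map_congr_left (fun pf _ => ?_)
    simp [mul_assoc]

theorem pvSpec_nil_of_neg : ∀ (xs : List Int) (a : Int), (∃ x ∈ xs, x < 0) → pvSpec xs a = []
  | [], _, h => by simp at h
  | x :: xs, a, h => by
    rcases h with ⟨z, hz, hneg⟩
    rcases List.mem_cons.1 hz with rfl | hz'
    · simp [pvSpec, PySem.List.pyRange_one_eq_nil (by omega : z + 1 ≤ 0)]
    · simp [pvSpec, pvSpec_nil_of_neg xs (a + 1) ⟨z, hz', hneg⟩]

theorem pvAlt_eq_spec : ∀ (xs : List Int) (a p f : Int),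
    pvAltRec xs a p f = (pvSpec xs a).map (fun pf => (p * pf.1, f * pf.2))
  | [], a, p, f => by simp [pvAltRec, pvSpec]
  | x :: rest, a, p, f => by
    by_cases hx : 0 ≤ x
    · have h := pvAlt_loop rest a p f (fun p' f' => pvAlt_eq_spec rest (a + 1) p' f') x
        (x + 1).toNat 0 (le_refl 0) (by omega) []
      have e1 : ((x.toNat.choose (0 : Int).toNat : Nat) : Int) = 1 := by simp
      have e2 : p * a ^ (0 : Int).toNat = p := by simp
      rw [e1, e2, List.nil_append] at h
      show ((PySem.List.pyRange 0 (x + 1) 1).foldl _ ([], 1, p)).1 = _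
      rw [h]
      simp only [pvSpec, List.map_flatMap, List.map_map]
      rfl
    · have hnil : PySem.List.pyRange 0 (x + 1) 1 = [] :=
        PySem.List.pyRange_one_eq_nil (by omega)
      show ((PySem.List.pyRange 0 (x + 1) 1).foldl _ ([], 1, p)).1 = _
      simp only [pvSpec]
      rw [hnil]
      simp

-- ===== VERDICT (by name: the statement is the Claim_ definition above) =====
theorem prodgreqs_base_spec : Claim_equal_prodgreqs_base := by
  intro A _
  unfold Spec_prodgreqs_base
  have hA : prodgreqs_base A = pvSpec A 2 := by
    have h := pvA_eq_spec A 2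
    simp only [prodgreqs_base, List.length_map]
    rw [show ((A.length : Int) + 1 + 1) = 2 + (A.length : Int) by ring]
    exact h
  have hB : prodgreqs_base_alt A = pvSpec A 2 := by
    rw [prodgreqs_base_alt]
    split_ifs with hneg
    · rw [pvSpec_nil_of_neg A 2 (by simpa using hneg)]
    · rw [pvAlt_eq_spec A 2 1 1]
      simp
  rw [hA, hB]
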